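-- pv_equiv track=rewrite | github.com/jobomat/hdm_cg | cg/maya/render/playblast.py | strip_illegal_chars
-- ===== SOURCE A (Python) =====
-- def strip_illegal_chars(this_string):
--     illegal_chars = [
--         '\\', '`', '*', '_', '{', '}', '[', ']', '(',
--         ')', '>', '#', '+', '-', '.', '!', '$', '\''
--     ]
--     for char in illegal_chars:
--         if char in this_string:
--             this_string = this_string.replace(char, "_")
--     return this_string
-- ===== SOURCE B (Python) =====
-- _TABLE = str.maketrans({c: '_' for c in "\\`*_{}[]()>#+-.!$'"})
--
--
-- def strip_illegal_chars(this_string):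
--     return this_string.translate(_TABLE)
-- ===== Notes on version B (the rewrite author's own statement) =====
-- stated objective: idiomatic
-- what changed: A rewrites the string with 18 successive full-string str.replace passes, one per illegal character; B builds a translation table (char-to-underscore dict) once and translates the string in a single pass with one table lookup per character.
import Mathlib
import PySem

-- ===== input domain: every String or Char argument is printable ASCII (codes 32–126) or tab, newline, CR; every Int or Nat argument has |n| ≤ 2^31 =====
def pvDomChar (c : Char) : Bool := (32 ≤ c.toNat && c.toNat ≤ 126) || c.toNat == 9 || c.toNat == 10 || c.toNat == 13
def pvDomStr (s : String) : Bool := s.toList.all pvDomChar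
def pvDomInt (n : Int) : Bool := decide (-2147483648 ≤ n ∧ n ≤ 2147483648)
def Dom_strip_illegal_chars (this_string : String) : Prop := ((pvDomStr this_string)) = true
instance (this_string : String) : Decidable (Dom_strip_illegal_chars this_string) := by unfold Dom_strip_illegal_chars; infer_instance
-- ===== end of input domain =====

-- B builds a translation table (char → '_') once and translates the string with one dict lookup per character, instead of A's 18 full-string replace passes (idiomatic rewrite).


-- ===== PORT A =====
-- A's illegal_chars list, in A's order
def illegal_chars_A : List Char :=
  ['\\', '`', '*', '_', '{', '}', '[', ']', '(',
   ')', '>', '#', '+', '-', '.', '!', '$', '\'']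

-- for char in illegal_chars: if char in this_string: this_string = this_string.replace(char, "_")
def strip_illegal_chars (this_string : String) : String :=
  illegal_chars_A.foldl
    (fun st c =>
      if PySem.Str.isIn (String.ofList [c]) st then PySem.Str.replace st (String.ofList [c]) "_" else st)
    this_string

-- ===== PORT B =====
-- _TABLE = str.maketrans({c: '_' for c in "\\`*_{}[]()>#+-.!$'"}) : a char→char mapping built once
def table_B : PySem.Dict Char Char :=
  "\\`*_{}[]()>#+-.!$'".toList.foldl (fun d c => d.insert c '_') PySem.Dict.empty

-- str.translate: each character is looked up in the table, unmapped characters pass through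
def translate_B (d : PySem.Dict Char Char) : List Char → List Char
  | [] => []
  | c :: rest => d.getD c c :: translate_B d rest

def strip_illegal_chars_alt (this_string : String) : String :=
  String.ofList (translate_B table_B this_string.toList)

-- ===== PRECONDITION & SPEC =====
def Spec_strip_illegal_chars (this_string : String) (out : String) : Prop := out = strip_illegal_chars_alt this_string
instance (this_string : String) (out : String) : Decidable (Spec_strip_illegal_chars this_string out) := by unfold Spec_strip_illegal_chars; infer_instance

-- ===== CLAIM =====
def Claim_equal_strip_illegal_chars : Prop := ∀ (this_string : String), Dom_strip_illegal_chars this_string → Spec_strip_illegal_chars this_string (strip_illegal_chars this_string)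

-- ===== LEMMAS AND PROOFS =====

-- replace with a single-character pattern is a character map (unfolds Chars.replace.go)
theorem replace_go_single (c u : Char) :
    ∀ (fuel : Nat) (l acc : List Char), l.length ≤ fuel →
      PySem.Chars.replace.go [c] [u] fuel l acc
        = acc.reverse ++ l.map (fun x => if x = c then u else x) := by
  intro fuel
  induction fuel with
  | zero =>
    intro l acc h
    have : l = [] := List.length_eq_zero_iff.mp (Nat.le_zero.mp h)
    subst this
    simp [PySem.Chars.replace.go]
  | succ n ih =>
    intro l acc h
    cases l with
    | nil => simp [PySem.Chars.replace.go]
    | cons a t =>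
      simp only [PySem.Chars.replace.go, List.isPrefixOf]
      by_cases hac : a = c
      · subst hac
        simp only [BEq.rfl, Bool.and_true]
        rw [ih]
        · simp
        · simpa using Nat.le_of_succ_le_succ h
      · have hca : (c == a) = false := by simp; exact fun e => hac e.symm
        simp only [hca, Bool.false_and]
        rw [if_neg (by simp)]
        rw [ih t (a :: acc) (by simpa using Nat.le_of_succ_le_succ h)]
        simp [hac]

theorem replace_single (l : List Char) (c u : Char) :
    PySem.Chars.replace l [c] [u] = l.map (fun x => if x = c then u else x) := by
  simp [PySem.Chars.replace, replace_go_single c u l.length l [] le_rfl]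

-- one step of A's loop, on the character list: a single character map
theorem stepA_toList (st : String) (c : Char) :
    (if PySem.Str.isIn (String.ofList [c]) st
       then PySem.Str.replace st (String.ofList [c]) "_" else st).toList
      = st.toList.map (fun x => if x = c then '_' else x) := by
  by_cases h : PySem.Str.isIn (String.ofList [c]) st = true
  · rw [if_pos h, PySem.Str.toList_replace]
    simp only [String.toList_ofList]
    exact replace_single st.toList c '_'
  · rw [if_neg h]
    have hmem : c ∉ st.toList := by
      intro hc
      apply h
      rw [PySem.Str.isIn_eq, String.toList_ofList, PySem.Chars.isIn_iff_infix]
      obtain ⟨l, r, hlr⟩ := List.mem_iff_append.mp hc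
      exact ⟨l, r, by simp [hlr]⟩
    calc st.toList = st.toList.map id := (List.map_id _).symm
      _ = _ := List.map_congr_left fun x hx => by
            have : x ≠ c := fun e => hmem (e ▸ hx)
            simp [this]

-- A's whole loop is the composition of the per-character maps
theorem foldA_toList (L : List Char) :
    ∀ (st : String),
      (L.foldl (fun st c =>
          if PySem.Str.isIn (String.ofList [c]) st
            then PySem.Str.replace st (String.ofList [c]) "_" else st) st).toList
        = st.toList.map (fun x => L.foldl (fun y c => if y = c then '_' else y) x) := by
  induction L with
  | nil => intro st; simp
  | cons c t ih =>
    intro st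
    rw [List.foldl_cons, ih, stepA_toList, List.map_map]
    refine List.map_congr_left fun x _ => ?_
    simp [List.foldl_cons]

-- folding the tests over the characters: '_' is a fixed point …
theorem fold_underscore (L : List Char) :
    L.foldl (fun y c => if y = c then '_' else y) '_' = '_' := by
  induction L with
  | nil => rfl
  | cons c t ih => simpa using ih

-- … so the composed per-character function is exactly the membership test
theorem fold_char (L : List Char) (x : Char) :
    L.foldl (fun y c => if y = c then '_' else y) x = if x ∈ L then '_' else x := by
  induction L generalizing x with
  | nil => simp
  | cons c t ih =>
    rw [List.foldl_cons]
    by_cases hxc : x = c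
    · subst hxc
      simp [fold_underscore]
    · rw [if_neg hxc, ih]
      simp [hxc]

-- a table built by inserting '_' at each key of L: lookup-with-default is the membership test
theorem getD_foldl_insert_underscore (L : List Char) :
    ∀ (d : PySem.Dict Char Char) (x : Char),
      (L.foldl (fun d c => d.insert c '_') d).getD x x
        = if x ∈ L then '_' else d.getD x x := by
  induction L with
  | nil => intro d x; simp
  | cons c t ih =>
    intro d x
    rw [List.foldl_cons, ih, PySem.Dict.getD_insert]
    by_cases hxc : x = c
    · subst hxc; simp
    · simp [hxc]

-- B's translate is the character map given by the table lookup
theorem translate_eq_map (d : PySem.Dict Char Char) (l : List Char) :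
    translate_B d l = l.map (fun x => d.getD x x) := by
  induction l with
  | nil => rfl
  | cons c rest ih => simp [translate_B, ih]

-- ===== VERDICT =====
theorem strip_illegal_chars_spec : Claim_equal_strip_illegal_chars := by
  intro s _
  unfold Spec_strip_illegal_chars
  rw [← String.toList_inj]
  unfold strip_illegal_chars strip_illegal_chars_alt
  rw [foldA_toList, String.toList_ofList, translate_eq_map]
  refine List.map_congr_left fun x _ => ?_
  rw [fold_char, table_B, getD_foldl_insert_underscore]
  have hL : "\\`*_{}[]()>#+-.!$'".toList = illegal_chars_A := by decide
  rw [hL]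
  by_cases h : x ∈ illegal_chars_A
  · rw [if_pos h, if_pos h]
  · rw [if_neg h, if_neg h, PySem.Dict.getD_empty]
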